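-- pv_equiv track=rewrite | github.com/wisdom0405/Algorithm_study | 프로그래머스/0/181887. 홀수 vs 짝수/홀수 vs 짝수.py | solution
-- ===== SOURCE A (Python) =====
-- def solution(num_list):
--     eval_sum = 0
--     odd_sum = 0
--     for i in range(len(num_list)):
--         if(i%2 == 0):
--             eval_sum += num_list[i]
--         else:
--             odd_sum += num_list[i]
--
--     return max(eval_sum, odd_sum)
-- ===== SOURCE B (Python) =====
-- def solution(num_list):
--     # Back-to-front single pass with swapping accumulators: no index, no parity branch.
--     even_acc = 0
--     odd_acc = 0
--     for x in reversed(num_list):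
--         even_acc, odd_acc = x + odd_acc, even_acc
--     return max(even_acc, odd_acc)
-- ===== Notes on version B (the rewrite author's own statement) =====
-- stated objective: alternative
-- what changed: Replaces the indexed loop with a parity branch by a back-to-front pass that swaps two accumulators each step (even index sum is always the first accumulator), eliminating the index and the if/else.
import Mathlib
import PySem

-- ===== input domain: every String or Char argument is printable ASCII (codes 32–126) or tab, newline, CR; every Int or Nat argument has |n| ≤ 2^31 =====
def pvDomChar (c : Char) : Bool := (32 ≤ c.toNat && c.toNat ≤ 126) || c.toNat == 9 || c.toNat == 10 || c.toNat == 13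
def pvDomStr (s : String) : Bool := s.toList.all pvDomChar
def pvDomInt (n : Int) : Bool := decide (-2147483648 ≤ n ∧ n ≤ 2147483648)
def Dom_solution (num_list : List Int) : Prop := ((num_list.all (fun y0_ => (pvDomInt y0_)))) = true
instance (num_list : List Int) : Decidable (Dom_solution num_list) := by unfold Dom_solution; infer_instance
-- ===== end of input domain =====

-- B replaces A's indexed loop with a parity branch by a back-to-front pass with two
-- swapping accumulators (alternative decomposition; same O(n) cost).

-- ===== PORT A =====
-- for i in range(len(num_list)): if i%2==0: eval_sum += num_list[i] else: odd_sum += num_list[i]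
def solution (num_list : List Int) : Int :=
  let p := (List.range num_list.length).foldl
    (fun (s : Int × Int) i =>
      if i % 2 == 0 then (s.1 + num_list.getD i 0, s.2)
      else (s.1, s.2 + num_list.getD i 0)) (0, 0)
  max p.1 p.2

-- ===== PORT B =====
-- for x in reversed(num_list): even_acc, odd_acc = x + odd_acc, even_acc
def solution_alt (num_list : List Int) : Int :=
  let p := num_list.reverse.foldl (fun (s : Int × Int) x => (x + s.2, s.1)) (0, 0)
  max p.1 p.2

-- ===== PRECONDITION & SPEC =====
def Spec_solution (num_list : List Int) (out : Int) : Prop := out = solution_alt num_list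
instance (num_list : List Int) (out : Int) : Decidable (Spec_solution num_list out) := by unfold Spec_solution; infer_instance

-- ===== CLAIM (what is proved, stated in full; the proofs are below) =====
def Claim_equal_solution : Prop := ∀ (num_list : List Int), Dom_solution num_list → Spec_solution num_list (solution num_list)

-- ===== LEMMAS AND PROOFS =====

-- the pair (sum at even indices, sum at odd indices), computed by the swap recursion
def pvSums (xs : List Int) : Int × Int :=
  xs.foldr (fun x p => (x + p.2, p.1)) (0, 0)

theorem pvAlt_eq (xs : List Int) : solution_alt xs = max (pvSums xs).1 (pvSums xs).2 := by
  simp [solution_alt, pvSums, List.foldl_reverse]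

-- A's indexed fold rewritten as a fold over the elements paired with their index
theorem pvRange_fold_eq (xs : List Int) (g : (Int × Int) → Nat → Int → (Int × Int))
    (init : Int × Int) :
    (List.range xs.length).foldl (fun s i => g s i (xs.getD i 0)) init
      = xs.zipIdx.foldl (fun s p => g s p.2 p.1) init := by
  have h : xs.zipIdx = (List.range xs.length).map (fun i => (xs.getD i 0, i)) := by
    apply List.ext_getElem
    · simp
    · intro i h1 h2
      simp [List.getD, List.getElem_zipIdx, *]
      simp at h1
      simp [h1]
  rw [h, List.foldl_map]

theorem pvZip_fold (xs : List Int) : ∀ (k : Nat) (e o : Int),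
    (xs.zipIdx k).foldl
      (fun (s : Int × Int) p => if p.2 % 2 == 0 then (s.1 + p.1, s.2) else (s.1, s.2 + p.1))
      (e, o)
    = if k % 2 = 0 then (e + (pvSums xs).1, o + (pvSums xs).2)
      else (e + (pvSums xs).2, o + (pvSums xs).1) := by
  induction xs with
  | nil => intro k e o; simp [pvSums]
  | cons x xs ih =>
    intro k e o
    have hs : pvSums (x :: xs) = (x + (pvSums xs).2, (pvSums xs).1) := by
      simp [pvSums]
    rcases Nat.even_or_odd k with hk | hk
    · have h0 : k % 2 = 0 := Nat.even_iff.mp hk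
      have h1 : (k + 1) % 2 = 1 := by omega
      rw [List.zipIdx_cons, List.foldl_cons]
      rw [if_pos (by simp [h0] : ((k % 2 == 0) = true))]
      rw [ih (k + 1), if_neg (by omega), hs, if_pos h0]
      simp only [Prod.mk.injEq]
      constructor <;> first | trivial | ring
    · have h0 : k % 2 = 1 := Nat.odd_iff.mp hk
      have h1 : (k + 1) % 2 = 0 := by omega
      rw [List.zipIdx_cons, List.foldl_cons]
      rw [if_neg (by simp [h0] : ¬ ((k % 2 == 0) = true))]
      rw [ih (k + 1), if_pos h1, hs, if_neg (by omega)]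
      simp only [Prod.mk.injEq]
      constructor <;> first | trivial | ring

-- ===== VERDICT (by name: the statement is the Claim_ definition above) =====
theorem solution_spec : Claim_equal_solution := by
  intro xs _
  show solution xs = solution_alt xs
  rw [pvAlt_eq]
  unfold solution
  rw [pvRange_fold_eq xs (fun s i v => if i % 2 == 0 then (s.1 + v, s.2) else (s.1, s.2 + v))]
  rw [pvZip_fold xs 0 0 0]
  simp
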